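-- pv_equiv track=rewrite | github.com/ewilson/aoc2020 | aoc/day10.py | find_essential_segments
-- ===== SOURCE A (Python) =====
-- def find_essential_segments(adapters):
--     full = [0] + sorted(adapters)
--     essential_points = []
--     for idx, val in enumerate(full):
--         if idx == 0 or idx == len(full)-1:
--             essential_points.append(idx)
--         elif val - full[idx-1] == 3 or full[idx+1] - val == 3:
--             essential_points.append(idx)
--     previous = None
--     segments = []
--     for idx in essential_points:
--         if previous is not None:
--             segments.append(full[previous:idx+1])
--         previous = idx
--     return segments
-- ===== SOURCE B (Python) =====
-- def find_essential_segments(adapters):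
--     # Single forward pass over the sorted chain: grow the current run until a
--     # 3-gap, emitting the finished run (if it has >= 2 points) and the
--     # two-point bridge segment at each gap; no index bookkeeping or slicing.
--     segments = []
--     cur = [0]
--     prev = 0
--     for v in sorted(adapters):
--         if v - prev == 3:
--             if len(cur) > 1:
--                 segments.append(cur)
--             segments.append([prev, v])
--             cur = [v]
--         else:
--             cur.append(v)
--         prev = v
--     if len(cur) > 1:
--         segments.append(cur)
--     return segments
-- ===== Notes on version B (the rewrite author's own statement) =====
-- stated objective: alternative
-- what changed: B replaces A's two staged passes (mark essential indices by an endpoint/both-neighbour test, then pair consecutive indices and slice) by one forward pass over the sorted chain that builds the segments directly: it grows the current run in an accumulator and, at each 3-gap, emits the finished run and the two-point bridge segment, with no index bookkeeping or slicing at all.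
import Mathlib
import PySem

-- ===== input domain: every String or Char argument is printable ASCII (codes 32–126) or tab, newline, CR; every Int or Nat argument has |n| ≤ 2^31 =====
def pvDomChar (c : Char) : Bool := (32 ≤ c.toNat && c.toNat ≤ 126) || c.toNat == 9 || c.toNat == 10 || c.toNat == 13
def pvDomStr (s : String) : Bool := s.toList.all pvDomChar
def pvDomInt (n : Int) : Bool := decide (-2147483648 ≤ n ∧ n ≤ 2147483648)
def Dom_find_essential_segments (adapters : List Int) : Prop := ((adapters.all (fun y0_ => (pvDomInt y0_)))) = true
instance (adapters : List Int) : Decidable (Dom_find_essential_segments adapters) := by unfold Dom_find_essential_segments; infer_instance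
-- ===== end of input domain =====

-- B builds the segments in one forward pass over the sorted chain (grow the current run, emit it
-- and a two-point bridge at each 3-gap) instead of A's staged essential-index marking + slicing
-- (alternative decomposition, same asymptotic cost).

-- ===== PORT A =====
-- full[idx-1] / full[idx+1] are only read when 0 < idx < len(full)-1, so they are always in
-- range and pyGetD's default 0 is never used.
def find_essential_segments (adapters : List Int) : List (List Int) :=
  let full : List Int := 0 :: PySem.List.sorted adapters (fun x => x)
  let essential_points : List Int :=
    (PySem.List.enumerate full).foldl
      (fun acc p =>
        if p.1 = 0 ∨ p.1 = (full.length : Int) - 1 then acc ++ [p.1]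
        else if p.2 - PySem.List.pyGetD full (p.1 - 1) 0 = 3 ∨
                PySem.List.pyGetD full (p.1 + 1) 0 - p.2 = 3 then acc ++ [p.1]
        else acc) []
  (essential_points.foldl
      (fun (st : Option Int × List (List Int)) idx =>
        match st.1 with
        | some prev => (some idx, st.2 ++ [PySem.List.slice full (some prev) (some (idx + 1))])
        | none => (some idx, st.2))
      (none, [])).2

-- ===== PORT B =====
-- state = (segments, cur, prev); cur is never empty and prev == cur[-1].
def find_essential_segments_alt (adapters : List Int) : List (List Int) :=
  let st :=
    (PySem.List.sorted adapters (fun x => x)).foldl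
      (fun (st : List (List Int) × List Int × Int) v =>
        if v - st.2.2 = 3 then
          ((if 1 < st.2.1.length then st.1 ++ [st.2.1] else st.1) ++ [[st.2.2, v]], [v], v)
        else (st.1, st.2.1 ++ [v], v))
      ([], [0], 0)
  if 1 < st.2.1.length then st.1 ++ [st.2.1] else st.1

-- ===== PRECONDITION & SPEC =====
def Spec_find_essential_segments (adapters : List Int) (out : List (List Int)) : Prop := out = find_essential_segments_alt adapters
instance (adapters : List Int) (out : List (List Int)) : Decidable (Spec_find_essential_segments adapters out) := by unfold Spec_find_essential_segments; infer_instance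

-- ===== CLAIM (what is proved, stated in full; the proofs are below) =====
def Claim_equal_find_essential_segments : Prop := ∀ (adapters : List Int), Dom_find_essential_segments adapters → Spec_find_essential_segments adapters (find_essential_segments adapters)

-- ===== LEMMAS AND PROOFS =====

-- A's "essential" test at index k, as written (Int indices, Python getD semantics)
def qA (full : List Int) (k : Nat) : Bool :=
  ((k : Int) == 0 || (k : Int) == (full.length : Int) - 1) ||
  (full.getD k 0 - PySem.List.pyGetD full ((k : Int) - 1) 0 == 3 ||
   PySem.List.pyGetD full ((k : Int) + 1) 0 - full.getD k 0 == 3)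

-- the same test on Nat indices (equal below the length)
def qN (full : List Int) (k : Nat) : Bool :=
  k == 0 || k == full.length - 1 ||
  (full.getD k 0 - full.getD (k - 1) 0 == 3 || full.getD (k + 1) 0 - full.getD k 0 == 3)

def epN (full : List Int) : List Nat :=
  (List.range full.length).filter (qN full)

-- the reference value of A: slices between consecutive essential indices
def coreA (full : List Int) : List (List Int) :=
  ((epN full).zip (epN full).tail).map
    (fun p => PySem.List.slice full (some ((p.1 : Nat) : Int)) (some (((p.2 : Nat) : Int) + 1)))

-- the reference value of B: the recursion the fold implements
def segsR : List Int → List Int → Int → List (List Int)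
  | [], cur, _ => if 1 < cur.length then [cur] else []
  | v :: rest, cur, prev =>
      if v - prev = 3 then
        (if 1 < cur.length then [cur] else []) ++ [prev, v] :: segsR rest [v] v
      else segsR rest (cur ++ [v]) v

-- no adjacent pair of the run differs by exactly 3
def NoGap (l : List Int) : Prop := List.IsChain (fun x y => y - x ≠ 3) l

lemma enumerate_eq (xs : List Int) (s : Int) :
    PySem.List.enumerate xs s =
      (List.range xs.length).map (fun (k : Nat) => (s + (k : Int), xs.getD k 0)) := by
  induction xs generalizing s with
  | nil => simp [PySem.List.enumerate]
  | cons x t ih =>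
      simp [PySem.List.enumerate, ih, List.range_succ_eq_map, List.map_map, Function.comp]
      intro a _; ring

lemma A_points (full : List Int) :
    (PySem.List.enumerate full).foldl
      (fun acc p =>
        if p.1 = 0 ∨ p.1 = (full.length : Int) - 1 then acc ++ [p.1]
        else if p.2 - PySem.List.pyGetD full (p.1 - 1) 0 = 3 ∨
                PySem.List.pyGetD full (p.1 + 1) 0 - p.2 = 3 then acc ++ [p.1]
        else acc) []
      = ((List.range full.length).filter (qA full)).map
          (fun (k : Nat) => (k : Int)) := by
  rw [enumerate_eq, List.foldl_map]
  simp only [zero_add]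
  refine Eq.trans (PySem.List.foldl_congr_mem' _ _
    (fun acc (k : Nat) => if qA full k then acc ++ [(k : Int)] else acc) _
    (by
      intro k _ acc
      by_cases h1 : ((k : Int) = 0 ∨ (k : Int) = (full.length : Int) - 1)
      · rw [if_pos h1]
        exact (if_pos (show qA full k = true by
          simp only [qA, Bool.or_eq_true, beq_iff_eq]; tauto)).symm
      · rw [if_neg h1]
        by_cases h2 : (full.getD k 0 - PySem.List.pyGetD full ((k : Int) - 1) 0 = 3 ∨
            PySem.List.pyGetD full ((k : Int) + 1) 0 - full.getD k 0 = 3)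
        · rw [if_pos h2]
          exact (if_pos (show qA full k = true by
            simp only [qA, Bool.or_eq_true, beq_iff_eq]; tauto)).symm
        · rw [if_neg h2]
          exact (if_neg (show ¬ qA full k = true by
            simp only [qA, Bool.or_eq_true, beq_iff_eq]; tauto)).symm)) ?_
  rw [PySem.List.foldl_append_ite]
  simp

lemma pairFold_aux (f : Int → Int → List Int) (t : List Int) (a : Int) (acc : List (List Int)) :
    (t.foldl
      (fun (st : Option Int × List (List Int)) idx =>
        match st.1 with
        | some prev => (some idx, st.2 ++ [f prev idx])
        | none => (some idx, st.2)) (some a, acc)).2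
      = acc ++ ((a :: t).zip t).map (fun p => f p.1 p.2) := by
  induction t generalizing a acc with
  | nil => simp
  | cons b t ih => simp [List.foldl_cons, ih b (acc ++ [f a b])]

lemma pairFold (f : Int → Int → List Int) (l : List Int) :
    (l.foldl
      (fun (st : Option Int × List (List Int)) idx =>
        match st.1 with
        | some prev => (some idx, st.2 ++ [f prev idx])
        | none => (some idx, st.2)) (none, [])).2
      = (l.zip l.tail).map (fun p => f p.1 p.2) := by
  cases l with
  | nil => simp
  | cons a t => simpa using pairFold_aux f t a []

-- below the length, A's Int-indexed test agrees with the Nat-indexed one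
lemma qA_eq_qN (full : List Int) (k : Nat) (hk : k < full.length) :
    qA full k = qN full k := by
  rw [Bool.eq_iff_iff]
  simp only [qA, qN, Bool.or_eq_true, beq_iff_eq]
  by_cases h0 : k = 0
  · subst h0; simp
  by_cases hl : k = full.length - 1
  · constructor
    · intro _; exact Or.inl (Or.inr hl)
    · intro _; left; right; omega
  have e1 : PySem.List.pyGetD full ((k : Int) - 1) 0 = full.getD (k - 1) 0 := by
    rw [show ((k : Int) - 1) = ((k - 1 : Nat) : Int) by omega, PySem.List.pyGetD_natCast]
  have e2 : PySem.List.pyGetD full ((k : Int) + 1) 0 = full.getD (k + 1) 0 := by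
    rw [show ((k : Int) + 1) = ((k + 1 : Nat) : Int) by push_cast; ring, PySem.List.pyGetD_natCast]
  rw [e1, e2]
  constructor
  · rintro ((h | h) | h)
    · exact absurd (by omega : k = 0) h0
    · exact absurd (by omega : k = full.length - 1) hl
    · exact Or.inr h
  · rintro ((h | h) | h)
    · exact absurd h h0
    · exact absurd h hl
    · exact Or.inr h

-- A's value is coreA of the full chain
lemma A_eq_coreA (adapters : List Int) :
    find_essential_segments adapters = coreA (0 :: PySem.List.sorted adapters (fun x => x)) := by
  unfold find_essential_segments
  simp only
  rw [A_points, pairFold (fun prev idx =>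
    PySem.List.slice (0 :: PySem.List.sorted adapters (fun x => x)) (some prev) (some (idx + 1)))]
  have hfil : (List.range (0 :: PySem.List.sorted adapters (fun x => x)).length).filter
      (qA (0 :: PySem.List.sorted adapters (fun x => x)))
      = epN (0 :: PySem.List.sorted adapters (fun x => x)) := by
    unfold epN
    refine List.filter_congr ?_
    intro k hk
    simp only [List.mem_range] at hk
    exact qA_eq_qN _ _ hk
  rw [hfil]
  unfold coreA
  rw [← List.map_tail, List.zip_map, List.map_map]
  rfl

-- B's fold, flushed at the end, is segsR
lemma B_fold (l : List Int) (segments : List (List Int)) (cur : List Int) (prev : Int) :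
    (let st := l.foldl
      (fun (st : List (List Int) × List Int × Int) v =>
        if v - st.2.2 = 3 then
          ((if 1 < st.2.1.length then st.1 ++ [st.2.1] else st.1) ++ [[st.2.2, v]], [v], v)
        else (st.1, st.2.1 ++ [v], v)) (segments, cur, prev)
     if 1 < st.2.1.length then st.1 ++ [st.2.1] else st.1)
      = segments ++ segsR l cur prev := by
  induction l generalizing segments cur prev with
  | nil =>
      simp only [List.foldl_nil, segsR]
      split_ifs <;> simp
  | cons v rest ih =>
      simp only [List.foldl_cons, segsR]
      by_cases hg : v - prev = 3
      · simp only [hg, ih]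
        split_ifs <;> simp
      · simp only [if_neg hg, ih]

lemma B_eq_segsR (adapters : List Int) :
    find_essential_segments_alt adapters = segsR (PySem.List.sorted adapters (fun x => x)) [0] 0 := by
  unfold find_essential_segments_alt
  simpa using B_fold (PySem.List.sorted adapters (fun x => x)) [] [0] 0

-- (range n).filter keeps exactly 0 and n-1 when the test holds there and nowhere in between
lemma filter_range_ends (n : Nat) (p : Nat → Bool) (hn : 1 ≤ n)
    (h0 : p 0 = true) (hl : p (n - 1) = true)
    (hmid : ∀ k, 0 < k → k < n - 1 → p k = false) :
    (List.range n).filter p = if n = 1 then [0] else [0, n - 1] := by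
  match n, hn with
  | 1, _ => simpa using h0
  | (m + 2), _ =>
    rw [if_neg (by omega)]
    rw [List.range_succ, List.filter_append]
    have h2 : List.filter p [m + 1] = [m + 1] := by
      simp only [List.filter_cons, List.filter_nil]
      rw [show m + 1 = m + 2 - 1 by omega, hl]
      rfl
    rw [h2]
    have h1 : (List.range (m + 1)).filter p = (List.range (m + 1)).filter (fun k => k == 0) := by
      refine List.filter_congr ?_
      intro k hk
      simp only [List.mem_range] at hk
      rcases Nat.eq_zero_or_pos k with rfl | hkp
      · simp [h0]
      · rw [hmid k hkp (by omega)]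
        simp; omega
    rw [h1, List.range_succ_eq_map, List.filter_cons]
    simp [List.filter_map, Function.comp_def]

-- head of epN is 0
lemma epN_head (w : List Int) (hw : w ≠ []) : ∃ t, epN w = 0 :: t := by
  obtain ⟨x, w', rfl⟩ := List.exists_cons_of_ne_nil hw
  refine ⟨((List.range w'.length).map Nat.succ).filter (qN (x :: w')), ?_⟩
  unfold epN
  rw [show (x :: w').length = w'.length + 1 from rfl, List.range_succ_eq_map, List.filter_cons]
  rw [if_pos (by simp [qN])]

-- NoGap gives non-3 adjacent differences by index
lemma nogap_getD (u : List Int) (hu : NoGap u) (i : Nat) (hi : i + 1 < u.length) :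
    u.getD (i + 1) 0 - u.getD i 0 ≠ 3 := by
  unfold NoGap at hu
  rw [List.isChain_iff_getElem] at hu
  rw [List.getD_eq_getElem _ _ hi, List.getD_eq_getElem _ _ (by omega)]
  exact hu i hi

-- a gap-free chain yields a single segment (or none if it is a single point)
lemma coreA_nogap (full : List Int) (hne : full ≠ []) (hg : NoGap full) :
    coreA full = if 1 < full.length then [full] else [] := by
  have hn : 1 ≤ full.length := List.length_pos_iff.mpr hne
  have hep : epN full = if full.length = 1 then [0] else [0, full.length - 1] := by
    unfold epN
    refine filter_range_ends _ _ hn (by simp [qN]) (by simp [qN]) ?_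
    intro k hk0 hk1
    simp only [qN, Bool.or_eq_false_iff, beq_eq_false_iff_ne, ne_eq]
    refine ⟨⟨by omega, by omega⟩, ?_, ?_⟩
    · rw [show k = (k - 1) + 1 by omega]
      exact nogap_getD full hg (k - 1) (by omega)
    · exact nogap_getD full hg k (by omega)
  unfold coreA
  rw [hep]
  by_cases h1 : full.length = 1
  · rw [if_pos h1, if_neg (by omega)]
    simp
  · rw [if_neg h1, if_pos (by omega)]
    simp only [List.tail_cons, List.zip_cons_cons, List.zip_nil_right, List.map_cons,
      List.map_nil]
    congr 1
    rw [show ((full.length - 1 : Nat) : Int) + 1 = ((full.length : Nat) : Int) by omega]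
    rw [PySem.List.slice_natCast]
    simp

lemma getD_append_right (u w : List Int) (i : Nat) :
    (u ++ w).getD (u.length + i) 0 = w.getD i 0 := by
  simp [List.getD, List.getElem?_append_right]

-- the essential indices of u ++ w: ends of u, then the essential indices of w shifted
lemma epN_split (u w : List Int) (a : Int) (hu : u ≠ []) (hw : w ≠ [])
    (hg : NoGap u) (hlast : u.getLast? = some a)
    (hgap : w.getD 0 0 - a = 3) :
    epN (u ++ w) = (if u.length = 1 then [0] else [0, u.length - 1])
      ++ (epN w).map (u.length + ·) := by
  have hul : 1 ≤ u.length := List.length_pos_iff.mpr hu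
  have hwl : 1 ≤ w.length := List.length_pos_iff.mpr hw
  have hlastD : u.getD (u.length - 1) 0 = a := by
    rw [List.getLast?_eq_getElem?] at hlast
    simp [List.getD, hlast]
  have hG : (u ++ w).getD (u.length - 1 + 1) 0 - (u ++ w).getD (u.length - 1) 0 = 3 := by
    rw [show u.length - 1 + 1 = u.length + 0 by omega, getD_append_right,
        List.getD_append u w 0 _ (by omega), hlastD]
    exact hgap
  unfold epN
  rw [List.length_append, List.range_add, List.filter_append]
  congr 1
  · refine filter_range_ends _ _ hul (by simp [qN]) ?_ ?_
    · simp only [qN, Bool.or_eq_true, beq_iff_eq]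
      right; right
      exact hG
    · intro k hk0 hk1
      simp only [qN, Bool.or_eq_false_iff, beq_eq_false_iff_ne, ne_eq]
      refine ⟨⟨by omega, by rw [List.length_append]; omega⟩, ?_, ?_⟩
      · rw [List.getD_append u w 0 _ (by omega), List.getD_append u w 0 _ (by omega),
            show k = (k - 1) + 1 by omega]
        exact nogap_getD u hg (k - 1) (by omega)
      · rw [List.getD_append u w 0 _ (by omega), List.getD_append u w 0 _ (by omega)]
        exact nogap_getD u hg k (by omega)
  · rw [List.filter_map]
    congr 1
    refine List.filter_congr ?_
    intro j hj
    simp only [List.mem_range] at hj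
    simp only [Function.comp_apply]
    rw [Bool.eq_iff_iff]
    simp only [qN, Bool.or_eq_true, beq_iff_eq]
    by_cases hj0 : j = 0
    · subst hj0
      refine iff_of_true ?_ (Or.inl (Or.inl rfl))
      right; left
      rw [show u.length + 0 - 1 = u.length - 1 by omega,
          show u.length + 0 = u.length - 1 + 1 by omega]
      exact hG
    by_cases hjl : j = w.length - 1
    · refine iff_of_true ?_ (Or.inl (Or.inr hjl))
      left; right
      rw [List.length_append]; omega
    · have h1j : 1 ≤ j := by omega
      have e0 : (u ++ w).getD (u.length + j) 0 = w.getD j 0 := getD_append_right u w j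
      have em : (u ++ w).getD (u.length + j - 1) 0 = w.getD (j - 1) 0 := by
        rw [show u.length + j - 1 = u.length + (j - 1) by omega]
        exact getD_append_right u w (j - 1)
      have ep : (u ++ w).getD (u.length + j + 1) 0 = w.getD (j + 1) 0 := by
        rw [show u.length + j + 1 = u.length + (j + 1) by omega]
        exact getD_append_right u w (j + 1)
      rw [List.length_append, e0, em, ep]
      constructor
      · rintro ((h | h) | h)
        · exfalso; omega
        · exfalso; omega
        · exact Or.inr h
      · rintro ((h | h) | h)
        · exact absurd h hj0
        · exact absurd h hjl
        · exact Or.inr h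

-- shifting every index past u leaves slices of w
lemma slice_shift (u w : List Int) (x y : Nat) :
    PySem.List.slice (u ++ w) (some ((u.length + x : Nat) : Int))
        (some (((u.length + y : Nat) : Int) + 1))
      = PySem.List.slice w (some ((x : Nat) : Int)) (some (((y : Nat) : Int) + 1)) := by
  rw [show (((u.length + y : Nat) : Int) + 1) = ((u.length + y + 1 : Nat) : Int) by push_cast; ring,
      show (((y : Nat) : Int) + 1) = ((y + 1 : Nat) : Int) by push_cast; ring,
      PySem.List.slice_natCast, PySem.List.slice_natCast, List.drop_length_add_append]
  congr 1
  omega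

-- the shifted tail of the index list contributes exactly coreA w
lemma shifted_map (u w : List Int) (t : List Nat) (ht : epN w = 0 :: t) :
    ((((0 :: t).map (u.length + ·)).zip (((0 :: t).map (u.length + ·)).tail)).map
        (fun p : Nat × Nat =>
          PySem.List.slice (u ++ w) (some ((p.1 : Nat) : Int)) (some (((p.2 : Nat) : Int) + 1))))
      = coreA w := by
  rw [← List.map_tail, List.zip_map, List.map_map]
  unfold coreA
  rw [ht]
  refine List.map_congr_left ?_
  rintro ⟨x, y⟩ hp
  simp only [Function.comp_apply, Prod.map_apply]
  exact slice_shift u w x y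

-- peeling the leading gap-free run off the chain
lemma coreA_split (u w : List Int) (a : Int) (hu : u ≠ []) (hw : w ≠ [])
    (hg : NoGap u) (hlast : u.getLast? = some a)
    (hgap : w.getD 0 0 - a = 3) :
    coreA (u ++ w) = (if 1 < u.length then [u] else []) ++ [a, w.getD 0 0] :: coreA w := by
  have hul : 1 ≤ u.length := List.length_pos_iff.mpr hu
  obtain ⟨t, ht⟩ := epN_head w hw
  obtain ⟨w0, w', rfl⟩ := List.exists_cons_of_ne_nil hw
  have hw0 : (w0 :: w').getD 0 0 = w0 := rfl
  have hsm := shifted_map u (w0 :: w') t ht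
  by_cases h1 : u.length = 1
  · obtain ⟨b, rfl⟩ := List.length_eq_one_iff.mp h1
    have hba : b = a := by simpa using hlast
    rw [if_neg (by simp)]
    conv_lhs => unfold coreA
    rw [epN_split [b] (w0 :: w') a hu (by simp) hg hlast hgap, if_pos h1, ht]
    simp only [List.map_cons, List.singleton_append, List.tail_cons, List.zip_cons_cons,
      List.map_cons] at hsm ⊢
    rw [hsm]
    congr 1
    have h2n : (([b].length + 0 : Nat) : Int) + 1 = ((2 : Nat) : Int) := by norm_num
    rw [h2n, PySem.List.slice_natCast, hba]
    rfl
  · have h2 : 1 < u.length := by omega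
    rw [if_pos h2]
    have hlastDrop : u.drop (u.length - 1) = [a] := by
      have hga : u.getLast hu = a := by
        have h := List.getLast?_eq_some_getLast hu
        rw [hlast] at h
        exact ((Option.some.injEq _ _).mp h).symm
      calc u.drop (u.length - 1)
          = (u.dropLast ++ [u.getLast hu]).drop u.dropLast.length := by
            rw [List.dropLast_concat_getLast hu, List.length_dropLast]
        _ = [u.getLast hu] := List.drop_left
        _ = [a] := by rw [hga]
    conv_lhs => unfold coreA
    rw [epN_split u (w0 :: w') a hu (by simp) hg hlast hgap, if_neg h1, ht]
    simp only [List.map_cons, List.cons_append, List.nil_append, List.tail_cons,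
      List.zip_cons_cons, List.map_cons] at hsm ⊢
    rw [hsm]
    congr 1
    · rw [show (((u.length - 1 : Nat) : Int) + 1) = ((u.length : Nat) : Int) by omega,
          PySem.List.slice_natCast]
      simp
    congr 1
    · rw [show (((u.length + 0 : Nat) : Int) + 1) = ((u.length + 1 : Nat) : Int) by push_cast; ring,
          PySem.List.slice_natCast, List.drop_append,
          show u.length + 1 - (u.length - 1) = 2 by omega,
          show u.length - 1 - u.length = 0 by omega, hlastDrop]
      simp

lemma segsR_eq_coreA (l : List Int) : ∀ (c : List Int) (a : Int), c ≠ [] →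
    c.getLast? = some a → NoGap c → segsR l c a = coreA (c ++ l) := by
  induction l with
  | nil =>
      intro c a hc hlast hg
      simp only [segsR, List.append_nil]
      exact (coreA_nogap c hc hg).symm
  | cons v rest ih =>
      intro c a hc hlast hg
      simp only [segsR]
      by_cases hgap : v - a = 3
      · rw [if_pos hgap]
        have h1 : segsR rest [v] v = coreA (v :: rest) := by
          simpa using ih [v] v (by simp) (by simp) (by simp [NoGap])
        rw [h1, coreA_split c (v :: rest) a hc (by simp) hg hlast (by simpa using hgap)]
        simp
      · rw [if_neg hgap]
        have hlast' : (c ++ [v]).getLast? = some v := by simp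
        have hg' : NoGap (c ++ [v]) := by
          rw [NoGap, List.isChain_append]
          refine ⟨hg, by simp, ?_⟩
          intro x hx y hy
          simp only [List.head?_cons, Option.mem_def, Option.some.injEq] at hy
          rw [hlast] at hx
          simp only [Option.mem_def, Option.some.injEq] at hx
          subst hx; subst hy; exact hgap
        have := ih (c ++ [v]) v (by simp) hlast' hg'
        rw [this]; simp

-- ===== VERDICT (by name: the statement is the Claim_ definition above) =====
theorem find_essential_segments_spec : Claim_equal_find_essential_segments := by
  intro adapters _
  unfold Spec_find_essential_segments
  rw [A_eq_coreA, B_eq_segsR]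
  exact (segsR_eq_coreA (PySem.List.sorted adapters (fun x => x)) [0] 0 (by simp) (by simp)
    (by simp [NoGap])).symm
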